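-- pv_equiv track=rewrite | github.com/sanikasurose/pulp | src/pulp/cli.py | _list_subtract
-- ===== SOURCE A (Python) =====
-- def _list_subtract(list_a: list[str], list_b: list[str]) -> list[str]:
--     remaining = list(list_a)
--     for item in list_b:
--         try:
--             remaining.remove(item)
--         except ValueError:
--             continue
--     return remaining
-- ===== SOURCE B (Python) =====
-- def _list_subtract(list_a: list[str], list_b: list[str]) -> list[str]:
--     drop = {}
--     for item in list_b:
--         drop[item] = drop.get(item, 0) + 1
--     result = []
--     for item in list_a:
--         if drop.get(item, 0) > 0:
--             drop[item] = drop[item] - 1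
--         else:
--             result.append(item)
--     return result
-- ===== Notes on version B (the rewrite author's own statement) =====
-- stated objective: faster
-- what changed: Replaces the loop over list_b with repeated remaining.remove (a linear scan per removal) by a frequency table built from list_b and one forward pass over list_a that skips the earliest occurrences.
import Mathlib
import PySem

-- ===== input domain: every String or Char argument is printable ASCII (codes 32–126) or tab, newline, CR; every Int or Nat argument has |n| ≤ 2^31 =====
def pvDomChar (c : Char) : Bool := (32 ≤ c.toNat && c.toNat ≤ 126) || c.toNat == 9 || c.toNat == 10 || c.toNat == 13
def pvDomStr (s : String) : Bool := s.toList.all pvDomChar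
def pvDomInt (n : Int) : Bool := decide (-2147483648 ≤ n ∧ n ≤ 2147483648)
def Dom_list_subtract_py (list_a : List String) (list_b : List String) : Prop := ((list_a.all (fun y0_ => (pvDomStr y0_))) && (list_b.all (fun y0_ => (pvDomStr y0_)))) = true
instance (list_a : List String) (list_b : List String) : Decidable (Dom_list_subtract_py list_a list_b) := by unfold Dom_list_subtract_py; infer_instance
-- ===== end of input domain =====

-- B replaces the remove-per-element-of-list_b loop by a frequency table and one forward pass over list_a (asymptotically faster).

-- ===== PORT A =====
-- remaining = list(list_a); for item in list_b: remaining.remove(item) (ValueError ignored)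
def list_subtract_py (list_a : List String) (list_b : List String) : List String :=
  list_b.foldl (fun remaining item => (PySem.List.remove? remaining item).getD remaining) list_a

-- ===== PORT B =====
-- drop = {}; for item in list_b: drop[item] = drop.get(item,0)+1
-- result = []; for item in list_a: if drop.get(item,0) > 0: drop[item] -= 1 else result.append(item)
def list_subtract_py_alt (list_a : List String) (list_b : List String) : List String :=
  let drop : PySem.Dict String Int :=
    list_b.foldl (fun d item => d.insert item (d.getD item 0 + 1)) PySem.Dict.empty
  (list_a.foldl
    (fun (st : PySem.Dict String Int × List String) item =>
      if st.1.getD item 0 > 0 then (st.1.insert item (st.1.getD item 0 - 1), st.2)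
      else (st.1, st.2 ++ [item]))
    (drop, [])).2

-- ===== PRECONDITION & SPEC =====
def Spec_list_subtract_py (list_a : List String) (list_b : List String) (out : List String) : Prop := out = list_subtract_py_alt list_a list_b
instance (list_a : List String) (list_b : List String) (out : List String) : Decidable (Spec_list_subtract_py list_a list_b out) := by unfold Spec_list_subtract_py; infer_instance

-- ===== CLAIM (what is proved, stated in full; the proofs are below) =====
def Claim_equal_list_subtract_py : Prop := ∀ (list_a : List String) (list_b : List String), Dom_list_subtract_py list_a list_b → Spec_list_subtract_py list_a list_b (list_subtract_py list_a list_b)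

-- ===== LEMMAS AND PROOFS =====

-- abstract form of B's second pass: keep each element unless its budget is still positive
def pvSub (l : List String) (c : String → Int) : List String :=
  match l with
  | [] => []
  | a :: t => if c a > 0 then pvSub t (fun s => if s = a then c s - 1 else c s)
              else a :: pvSub t c

theorem pv_removeD_eq_erase (rem : List String) (item : String) :
    (PySem.List.remove? rem item).getD rem = rem.erase item := by
  by_cases h : item ∈ rem
  · simp [PySem.List.remove?_eq_some_erase, h]
  · rw [(PySem.List.remove?_eq_none_iff rem item).2 h, List.erase_of_not_mem h]; rfl

theorem pv_foldl_erase (list_b : List String) :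
    ∀ list_a : List String,
    list_b.foldl (fun remaining item => remaining.erase item) list_a = list_a.diff list_b := by
  induction list_b with
  | nil => intro la; simp
  | cons b bs ih => intro la; simp only [List.foldl_cons, List.diff_cons, ih]

theorem pv_A_eq_diff (list_a list_b : List String) :
    list_subtract_py list_a list_b = list_a.diff list_b := by
  unfold list_subtract_py
  simp only [pv_removeD_eq_erase]
  exact pv_foldl_erase list_b list_a

theorem pv_diff_eq_sub (list_a : List String) :
    ∀ list_b : List String, list_a.diff list_b = pvSub list_a (fun s => (list_b.count s : Int)) := by
  induction list_a with
  | nil => intro list_b; simp [pvSub]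
  | cons a t ih =>
      intro list_b
      rw [List.cons_diff]
      by_cases h : a ∈ list_b
      · have hpos : (0 : Int) < (list_b.count a : Int) := by
          exact_mod_cast List.count_pos_iff.2 h
        simp only [pvSub, if_pos h, if_pos hpos, ih (list_b.erase a)]
        congr 1
        funext s
        by_cases hs : s = a
        · subst hs
          have h2 : 1 ≤ list_b.count s := List.count_pos_iff.2 h
          simp [List.count_erase_self, Nat.cast_sub h2]
        · rw [List.count_erase_of_ne hs, if_neg hs]
      · have hz : ¬ (0 : Int) < (list_b.count a : Int) := by
          simp [List.count_eq_zero_of_not_mem h]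
        simp only [pvSub, if_neg h, if_neg hz, ih list_b]

theorem pv_B_loop (list_a : List String) :
    ∀ (d : PySem.Dict String Int) (acc : List String),
    (list_a.foldl
      (fun (st : PySem.Dict String Int × List String) item =>
        if st.1.getD item 0 > 0 then (st.1.insert item (st.1.getD item 0 - 1), st.2)
        else (st.1, st.2 ++ [item]))
      (d, acc)).2 = acc ++ pvSub list_a (fun s => d.getD s 0) := by
  induction list_a with
  | nil => intro d acc; simp [pvSub]
  | cons a t ih =>
      intro d acc
      simp only [List.foldl_cons]
      by_cases h : d.getD a 0 > 0
      · rw [if_pos h]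
        rw [ih (d.insert a (d.getD a 0 - 1)) acc]
        simp only [pvSub, if_pos h]
        congr 2
        funext s
        rw [PySem.Dict.getD_insert]
        by_cases hs : s = a
        · subst hs; simp
        · simp [hs]
      · rw [if_neg h]
        rw [ih d (acc ++ [a])]
        simp [pvSub, if_neg h]

theorem pv_counter_getD (list_b : List String) (s : String) :
    (list_b.foldl (fun d item => d.insert item (d.getD item 0 + 1))
      (PySem.Dict.empty : PySem.Dict String Int)).getD s 0 = (list_b.count s : Int) := by
  rw [PySem.Dict.getD_foldl_insert_add_one]
  simp

theorem pv_B_eq_sub (list_a list_b : List String) :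
    list_subtract_py_alt list_a list_b = pvSub list_a (fun s => (list_b.count s : Int)) := by
  unfold list_subtract_py_alt
  rw [pv_B_loop]
  simp only [pv_counter_getD, List.nil_append]

-- ===== VERDICT (by name: the statement is the Claim_ definition above) =====
theorem list_subtract_py_spec : Claim_equal_list_subtract_py := by
  intro list_a list_b _
  unfold Spec_list_subtract_py
  rw [pv_A_eq_diff, pv_diff_eq_sub, pv_B_eq_sub]
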